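-- pv_equiv track=rewrite | github.com/sterrettJD/AoC-2022 | Day-7.py | collect_ls_output
-- ===== SOURCE A (Python) =====
-- def collect_ls_output(data, start_line):
--     next_command_found = False
--     full_output = []
--     curr_line = start_line
--
--     while( next_command_found==False and curr_line < len(data)):
--         line = data[curr_line]
--         if line.startswith("$") or line=="":
--             next_command_found = True
--             return full_output
--
--         full_output.append(line)
--         curr_line += 1
-- ===== SOURCE B (Python) =====
-- def collect_ls_output(data, start_line):
--     end = next((i for i in range(start_line, len(data))
--                 if data[i].startswith("$") or data[i] == ""), None)
--     if end is None:
--         return None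
--     return data[start_line:end]
-- ===== Notes on version B (the rewrite author's own statement) =====
-- stated objective: simpler
-- what changed: B replaces A's accumulator loop (append each line, early return on command) with a boundary search for the first command/empty line at or after start_line, then returns the single slice data[start_line:end]; Pre_ excludes inputs where A falls off the loop and returns Python None (no list value) and start_line < -len(data), where A raises IndexError.
-- intended difference: On negative start_line whose last -start_line lines contain no command/empty line (but an earlier line is one), A wraps past the end and returns lines re-read from the top of the list, while B returns the empty slice data[start_line:end]; B's plain-slice reading is the intended behaviour on this out-of-range corner (the caller only ever passes real line indices). — e.g. on collect_ls_output(["", "a"], -1): A returns ["a"], B returns []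
-- outside the precondition, e.g. on collect_ls_output(['a'], 0): A returns None, B returns None
import Mathlib
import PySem

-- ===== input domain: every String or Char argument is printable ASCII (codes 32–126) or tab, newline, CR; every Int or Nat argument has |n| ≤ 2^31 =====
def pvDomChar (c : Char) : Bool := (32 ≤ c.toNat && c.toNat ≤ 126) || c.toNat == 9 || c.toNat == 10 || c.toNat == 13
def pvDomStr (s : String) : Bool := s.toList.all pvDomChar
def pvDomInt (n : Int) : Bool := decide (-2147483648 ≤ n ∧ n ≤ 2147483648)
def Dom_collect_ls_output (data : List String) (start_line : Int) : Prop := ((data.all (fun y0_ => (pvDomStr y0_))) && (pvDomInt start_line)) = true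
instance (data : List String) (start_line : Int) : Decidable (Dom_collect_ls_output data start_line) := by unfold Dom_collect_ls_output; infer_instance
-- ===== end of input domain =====

-- B replaces A's per-line accumulator loop with a boundary search plus one slice (simpler decomposition, same cost).


-- ===== PORT A =====
-- while-loop of A: state (full_output, curr_line); returns full_output on a command/empty
-- line; falling off the loop is Python's implicit None (outside Pre_, dummy []).
def collectLoopA (data : List String) (acc : List String) (curr : Int) : List String :=
  if _h : curr < (data.length : Int) then
    match PySem.List.pyGet? data curr with
    | none => []            -- IndexError (outside Pre_)
    | some line =>
      if PySem.Str.startswith line "$" || line == "" then acc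
      else collectLoopA data (acc ++ [line]) (curr + 1)
  else []                   -- implicit None (outside Pre_)
termination_by ((data.length : Int) - curr).toNat
decreasing_by omega

def collect_ls_output (data : List String) (start_line : Int) : List String :=
  collectLoopA data [] start_line

-- ===== PORT B =====
-- B: find the first command/empty line index at or after start_line, then slice.
def isBoundary (data : List String) (i : Int) : Bool :=
  match PySem.List.pyGet? data i with
  | none => false            -- IndexError (outside Pre_)
  | some line => PySem.Str.startswith line "$" || line == ""

def collect_ls_output_alt (data : List String) (start_line : Int) : List String :=
  match (PySem.List.pyRange start_line (data.length : Int) 1).find? (isBoundary data) with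
  | none => []               -- Python B returns None here (outside Pre_)
  | some e => PySem.List.slice data (some start_line) (some e)

-- ===== PRECONDITION & SPEC =====
-- the i-th line (0-based) is a command line ('$'-prefixed) or empty
def isCmdAt (data : List String) (i : Nat) : Bool :=
  PySem.Str.startswith (data.getD i "x") "$" || data.getD i "x" == ""

-- Pre_ excludes: (a) inputs with no reachable command/empty line, on which A falls off the
-- loop and returns Python None (no value of the declared list type); (b) start_line < -len(data),
-- on which A raises IndexError on the first access.
def Pre_collect_ls_output (data : List String) (start_line : Int) : Prop :=
  -(data.length : Int) ≤ start_line ∧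
    ∃ i : Nat, i < data.length ∧ (start_line ≤ (i : Int) ∨ start_line < 0) ∧ isCmdAt data i = true
instance (data : List String) (start_line : Int) : Decidable (Pre_collect_ls_output data start_line) := by unfold Pre_collect_ls_output; infer_instance

def pvWitness_collect_ls_output : List String × Int := (["dir a", "123 b.txt", "$ cd a"], 0)

-- On negative start_line whose last -start_line lines contain no command/empty line (but an
-- earlier line is one), A wraps past the end and returns lines re-read from the top of the
-- list, while B returns the empty slice data[start_line:end]; B's plain-slice reading is the
-- intended behaviour on this out-of-range corner (the caller only ever passes real line indices).
def D_collect_ls_output (data : List String) (start_line : Int) : Prop :=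
  start_line < 0 ∧ -(data.length : Int) ≤ start_line ∧
    (∀ i : Nat, i < data.length → (data.length : Int) + start_line ≤ (i : Int) → isCmdAt data i = false) ∧
    (∃ i : Nat, i < data.length ∧ (i : Int) < (data.length : Int) + start_line ∧ isCmdAt data i = true)
instance (data : List String) (start_line : Int) : Decidable (D_collect_ls_output data start_line) := by unfold D_collect_ls_output; infer_instance

def Spec_collect_ls_output (data : List String) (start_line : Int) (out : List String) : Prop := ¬ D_collect_ls_output data start_line → out = collect_ls_output_alt data start_line
instance (data : List String) (start_line : Int) (out : List String) : Decidable (Spec_collect_ls_output data start_line out) := by unfold Spec_collect_ls_output; infer_instance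

def pvDiffWitness_collect_ls_output : List String × Int := (["", "a"], -1)
def pvDiffWitnessOut_collect_ls_output : (List String) × (List String) := (["a"], [])

-- ===== CLAIM (what is proved, stated in full; the proofs are below) =====
def Claim_unchanged_collect_ls_output : Prop := ∀ (data : List String) (start_line : Int), Dom_collect_ls_output data start_line → Pre_collect_ls_output data start_line → Spec_collect_ls_output data start_line (collect_ls_output data start_line)
def Claim_changed_collect_ls_output : Prop := Dom_collect_ls_output (pvDiffWitness_collect_ls_output.1) (pvDiffWitness_collect_ls_output.2) ∧ Pre_collect_ls_output (pvDiffWitness_collect_ls_output.1) (pvDiffWitness_collect_ls_output.2) ∧ D_collect_ls_output (pvDiffWitness_collect_ls_output.1) (pvDiffWitness_collect_ls_output.2) ∧ collect_ls_output (pvDiffWitness_collect_ls_output.1) (pvDiffWitness_collect_ls_output.2) = pvDiffWitnessOut_collect_ls_output.1 ∧ collect_ls_output_alt (pvDiffWitness_collect_ls_output.1) (pvDiffWitness_collect_ls_output.2) = pvDiffWitnessOut_collect_ls_output.2 ∧ pvDiffWitnessOut_collect_ls_output.1 ≠ pvDiffWitnessOut_collect_ls_output.2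
def Claim_exact_collect_ls_output : Prop := ∀ (data : List String) (start_line : Int), Dom_collect_ls_output data start_line → Pre_collect_ls_output data start_line → D_collect_ls_output data start_line → collect_ls_output data start_line ≠ collect_ls_output_alt data start_line

-- ===== LEMMAS AND PROOFS =====

-- isBoundary read through the two index regimes
lemma isBoundary_negIdx (data : List String) (curr : Int)
    (hlo : -(data.length : Int) ≤ curr) (hneg : curr < 0) :
    isBoundary data curr = isCmdAt data ((data.length : Int) + curr).toNat := by
  have ht : ((data.length : Int) + curr).toNat < data.length := by omega
  have hk : curr = -(((-curr).toNat : Nat) : Int) := by omega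
  have hg0 : PySem.List.pyGet? data curr = data[data.length - (-curr).toNat]? := by
    conv_lhs => rw [hk]
    exact PySem.List.pyGet?_neg_natCast data ((-curr).toNat) (by omega) (by omega)
  have hidx : data.length - (-curr).toNat = ((data.length : Int) + curr).toNat := by omega
  rw [isBoundary, hg0, hidx, List.getElem?_eq_getElem ht, isCmdAt,
    List.getD_eq_getElem data "x" ht]

lemma isBoundary_nonnegIdx (data : List String) (curr : Int)
    (h0 : 0 ≤ curr) (hlt : curr < (data.length : Int)) :
    isBoundary data curr = isCmdAt data curr.toNat := by
  have ht : curr.toNat < data.length := by omega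
  rw [isBoundary, PySem.List.pyGet?_eq_some_getElem data h0 hlt, isCmdAt,
    List.getD_eq_getElem data "x" ht]

-- loop invariant for a non-negative cursor, by induction on the remaining length
lemma collectLoopA_eq (data : List String) :
    ∀ (n : Nat) (acc : List String) (curr : Int), 0 ≤ curr →
      (((data.length : Int) - curr).toNat = n) →
      (∃ i : Nat, i < data.length ∧ curr ≤ (i : Int) ∧ isCmdAt data i = true) →
      collectLoopA data acc curr =
        acc ++ (match (PySem.List.pyRange curr (data.length : Int) 1).find? (isBoundary data) with
                | none => []
                | some e => PySem.List.slice data (some curr) (some e)) := by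
  intro n
  induction n with
  | zero =>
    intro acc curr h0 hn ⟨i, hi, hci, _⟩
    omega
  | succ n ih =>
    intro acc curr h0 hn hex
    obtain ⟨i, hi, hci, hcmd⟩ := hex
    rw [isCmdAt, List.getD_eq_getElem data "x" hi] at hcmd
    have hlt : curr < (data.length : Int) := by omega
    have hcurrNat : curr.toNat < data.length := by omega
    have hget : PySem.List.pyGet? data curr = some data[curr.toNat] :=
      PySem.List.pyGet?_eq_some_getElem data h0 hlt
    have hrange : PySem.List.pyRange curr (data.length : Int) 1
        = curr :: PySem.List.pyRange (curr + 1) (data.length : Int) 1 :=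
      PySem.List.pyRange_one_cons hlt
    rw [collectLoopA, dif_pos hlt, hget]
    dsimp only
    by_cases hb : (PySem.Str.startswith data[curr.toNat] "$" || data[curr.toNat] == "") = true
    · -- boundary reached: A returns acc, B's find? is some curr, slice empty
      rw [if_pos hb, hrange]
      have hbd : isBoundary data curr = true := by
        simp only [isBoundary, hget]
        exact hb
      rw [List.find?_cons_of_pos hbd]
      have : PySem.List.slice data (some curr) (some curr) = [] := by
        rw [PySem.List.slice_toNat data h0 h0]; simp
      simp [this]
    · -- not a boundary: step
      rw [if_neg hb]
      have hne : (i : Int) ≠ curr := by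
        intro hEq
        have hieq : i = curr.toNat := by omega
        subst hieq
        exact hb hcmd
      have hex' : ∃ j : Nat, j < data.length ∧ curr + 1 ≤ (j : Int) ∧ isCmdAt data j = true :=
        ⟨i, hi, by omega, by rw [isCmdAt, List.getD_eq_getElem data "x" hi]; exact hcmd⟩
      rw [ih (acc ++ [data[curr.toNat]]) (curr + 1) (by omega) (by omega) hex']
      have hbd : isBoundary data curr = false := by
        simp only [isBoundary, hget]
        simpa using hb
      rw [hrange, List.find?_cons_of_neg (by simp [hbd])]
      -- relate the two slices
      cases hfind : (PySem.List.pyRange (curr + 1) (data.length : Int) 1).find?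
          (isBoundary data) with
      | none =>
        exfalso
        obtain ⟨j, hj, hcj, hcmdj⟩ := hex'
        have hmem : (j : Int) ∈ PySem.List.pyRange (curr + 1) (data.length : Int) 1 := by
          rw [PySem.List.mem_pyRange_one]
          exact ⟨hcj, by exact_mod_cast hj⟩
        have hg : PySem.List.pyGet? data (j : Int) = some data[j] :=
          PySem.List.pyGet?_ofNat data j hj
        have hbj : isBoundary data (j : Int) = true := by
          simp only [isBoundary, hg]
          rwa [isCmdAt, List.getD_eq_getElem data "x" hj] at hcmdj
        exact (List.find?_eq_none.mp hfind _ hmem) hbj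
      | some e =>
        dsimp only
        have he : curr + 1 ≤ e ∧ e < (data.length : Int) := by
          have hmem := List.mem_of_find?_eq_some hfind
          rw [PySem.List.mem_pyRange_one] at hmem
          exact hmem
        have h0e : 0 ≤ e := by omega
        rw [PySem.List.slice_toNat data h0 h0e, PySem.List.slice_toNat data (by omega) h0e]
        simp only [List.append_assoc, List.cons_append, List.nil_append]
        -- acc ++ [x] ++ take/drop = acc ++ (x :: take/drop)
        have hdrop : data.drop curr.toNat = data[curr.toNat] :: data.drop (curr + 1).toNat := by
          have h1 : (curr + 1).toNat = curr.toNat + 1 := by omega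
          rw [h1]
          exact (List.getElem_cons_drop hcurrNat).symm
        have htake : (e.toNat - curr.toNat) = (e.toNat - (curr + 1).toNat) + 1 := by omega
        rw [hdrop, htake, List.take_succ_cons]

-- loop invariant for a negative cursor whose wrapped tail still holds a boundary:
-- A stops at the first (negative-index) boundary e, and B's find? returns the same e
lemma collectLoopA_neg (data : List String) :
    ∀ (n : Nat) (acc : List String) (curr : Int),
      -(data.length : Int) ≤ curr → curr < 0 → ((-curr).toNat = n) →
      (∃ i : Nat, i < data.length ∧ (data.length : Int) + curr ≤ (i : Int) ∧ isCmdAt data i = true) →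
      ∃ e : Int, curr ≤ e ∧ e < 0 ∧
        (PySem.List.pyRange curr (data.length : Int) 1).find? (isBoundary data) = some e ∧
        collectLoopA data acc curr = acc ++ PySem.List.slice data (some curr) (some e) := by
  intro n
  induction n with
  | zero =>
    intro acc curr hlo hneg hn _
    omega
  | succ n ih =>
    intro acc curr hlo hneg hn hex
    obtain ⟨i, hi, hci, hcmd⟩ := hex
    rw [isCmdAt, List.getD_eq_getElem data "x" hi] at hcmd
    -- the wrapped position of curr
    have htpos : (0 : Int) ≤ (data.length : Int) + curr := by omega
    have ht : ((data.length : Int) + curr).toNat < data.length := by omega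
    have hk : curr = -(((-curr).toNat : Nat) : Int) := by omega
    have hkpos : 0 < (-curr).toNat := by omega
    have hkle : (-curr).toNat ≤ data.length := by omega
    have hidx : data.length - (-curr).toNat = ((data.length : Int) + curr).toNat := by omega
    have hg0 : PySem.List.pyGet? data curr = data[data.length - (-curr).toNat]? := by
      conv_lhs => rw [hk]
      exact PySem.List.pyGet?_neg_natCast data ((-curr).toNat) hkpos hkle
    have hget : PySem.List.pyGet? data curr
        = some data[((data.length : Int) + curr).toNat] := by
      rw [hg0, hidx, List.getElem?_eq_getElem ht]
    have hlt : curr < (data.length : Int) := by omega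
    have hrange : PySem.List.pyRange curr (data.length : Int) 1
        = curr :: PySem.List.pyRange (curr + 1) (data.length : Int) 1 :=
      PySem.List.pyRange_one_cons hlt
    rw [collectLoopA, dif_pos hlt, hget]
    dsimp only
    by_cases hb : (PySem.Str.startswith data[((data.length : Int) + curr).toNat] "$"
        || data[((data.length : Int) + curr).toNat] == "") = true
    · -- boundary at curr itself
      refine ⟨curr, le_refl curr, hneg, ?_, ?_⟩
      · rw [hrange]
        exact List.find?_cons_of_pos (by simp only [isBoundary, hget]; exact hb)
      · rw [if_pos hb]
        have : PySem.List.slice data (some curr) (some curr) = [] := by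
          simp [PySem.List.slice]
        rw [this, List.append_nil]
    · -- no boundary at curr: the witness forces curr + 1 < 0, recurse
      rw [if_neg hb]
      have hne : (i : Int) ≠ (data.length : Int) + curr := by
        intro hEq
        have hieq : i = ((data.length : Int) + curr).toNat := by omega
        subst hieq
        exact hb hcmd
      have hcurr1 : curr + 1 < 0 := by
        by_contra hcon
        have : curr = -1 := by omega
        subst this
        have : i = data.length - 1 := by omega
        have : (i : Int) = (data.length : Int) + (-1) := by omega
        exact hne this
      have hex' : ∃ j : Nat, j < data.length ∧
          (data.length : Int) + (curr + 1) ≤ (j : Int) ∧ isCmdAt data j = true :=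
        ⟨i, hi, by omega, by rw [isCmdAt, List.getD_eq_getElem data "x" hi]; exact hcmd⟩
      obtain ⟨e, he1, he2, hfind, heq⟩ :=
        ih (acc ++ [data[((data.length : Int) + curr).toNat]]) (curr + 1)
          (by omega) hcurr1 (by omega) hex'
      refine ⟨e, by omega, he2, ?_, ?_⟩
      · rw [hrange, List.find?_cons_of_neg
          (by simp only [isBoundary, hget]; simpa using hb), hfind]
      · rw [heq]
        -- slice data curr e = data[len+curr] :: slice data (curr+1) e (all indices negative)
        have hsl : PySem.List.slice data (some curr) (some e)
            = data[((data.length : Int) + curr).toNat]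
              :: PySem.List.slice data (some (curr + 1)) (some e) := by
          have ha : PySem.List.clampIdx data.length curr
              = ((data.length : Int) + curr).toNat := by
            simp only [PySem.List.clampIdx, if_pos hneg]
            rw [if_neg (by omega : ¬ ((data.length : Int) + curr < 0))]
          have ha' : PySem.List.clampIdx data.length (curr + 1)
              = ((data.length : Int) + curr).toNat + 1 := by
            simp only [PySem.List.clampIdx, if_pos hcurr1]
            rw [if_neg (by omega : ¬ ((data.length : Int) + (curr + 1) < 0))]
            omega
          have hbnd : PySem.List.clampIdx data.length e
              = ((data.length : Int) + e).toNat := by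
            simp only [PySem.List.clampIdx, if_pos he2]
            rw [if_neg (by omega : ¬ ((data.length : Int) + e < 0))]
          simp only [PySem.List.slice, ha, ha', hbnd]
          have hdrop : data.drop (((data.length : Int) + curr).toNat)
              = data[((data.length : Int) + curr).toNat]
                :: data.drop (((data.length : Int) + curr).toNat + 1) :=
            (List.getElem_cons_drop ht).symm
          have htake : ((data.length : Int) + e).toNat - ((data.length : Int) + curr).toNat
              = (((data.length : Int) + e).toNat - (((data.length : Int) + curr).toNat + 1)) + 1 := by
            omega
          rw [hdrop, htake, List.take_succ_cons]
        rw [hsl]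
        simp

-- ===== VERDICT (by name: the statement is the Claim_ definition above) =====
theorem collect_ls_output_spec : Claim_unchanged_collect_ls_output := by
  intro data start_line _ hpre hnd
  obtain ⟨hlo, i, hi, hci, hcmd⟩ := hpre
  unfold collect_ls_output collect_ls_output_alt
  by_cases hs : 0 ≤ start_line
  · -- non-negative start: the positive-cursor lemma
    have hci' : start_line ≤ (i : Int) := by
      rcases hci with h | h
      · exact h
      · omega
    rw [collectLoopA_eq data (((data.length : Int) - start_line).toNat) [] start_line hs rfl
      ⟨i, hi, hci', hcmd⟩]
    simp
  · -- negative start: Pre_ ∧ ¬D_ forces a boundary in the wrapped tail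
    push Not at hs
    have hwrap : ∃ j : Nat, j < data.length ∧
        (data.length : Int) + start_line ≤ (j : Int) ∧ isCmdAt data j = true := by
      by_contra hno
      push Not at hno
      apply hnd
      refine ⟨hs, hlo, ?_, ?_⟩
      · intro j hj hje
        have hf := hno j hj hje
        simp only [Bool.not_eq_true] at hf
        exact hf
      · refine ⟨i, hi, ?_, hcmd⟩
        by_contra hge
        push Not at hge
        exact (hno i hi hge) hcmd
    obtain ⟨e, _, _, hfind, heq⟩ :=
      collectLoopA_neg data ((-start_line).toNat) [] start_line hlo hs rfl hwrap
    rw [heq, hfind]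
    simp

-- inside D_: A's loop crosses the end, so its result contains at least the first wrapped line
lemma collectLoopA_ne_nil (data : List String) :
    ∀ (n : Nat) (acc : List String) (curr : Int),
      -(data.length : Int) ≤ curr → curr < 0 → ((-curr).toNat = n) →
      (∀ i : Nat, i < data.length → (data.length : Int) + curr ≤ (i : Int) → isCmdAt data i = false) →
      (∃ j : Nat, j < data.length ∧ isCmdAt data j = true) →
      collectLoopA data acc curr ≠ [] := by
  intro n
  induction n with
  | zero =>
    intro acc curr hlo hneg hn _ _
    omega
  | succ n ih =>
    intro acc curr hlo hneg hn hall hex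
    obtain ⟨j, hj, hjcmd⟩ := hex
    have hlen : 0 < data.length := hj.trans_le' (Nat.zero_le j) |>.trans_le (le_refl _) |>.trans_le (le_refl _)
    have hlt : curr < (data.length : Int) := by omega
    have ht : ((data.length : Int) + curr).toNat < data.length := by omega
    have hbd : isBoundary data curr = false := by
      rw [isBoundary_negIdx data curr hlo hneg]
      exact hall _ ht (by omega)
    have hget : PySem.List.pyGet? data curr
        = some (data.getD ((data.length : Int) + curr).toNat "x") := by
      have hk : curr = -(((-curr).toNat : Nat) : Int) := by omega
      have hg0 : PySem.List.pyGet? data curr = data[data.length - (-curr).toNat]? := by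
        conv_lhs => rw [hk]
        exact PySem.List.pyGet?_neg_natCast data ((-curr).toNat) (by omega) (by omega)
      have hidx : data.length - (-curr).toNat = ((data.length : Int) + curr).toNat := by omega
      rw [hg0, hidx, List.getElem?_eq_getElem ht, List.getD_eq_getElem data "x" ht]
    have hnb : ¬ (PySem.Str.startswith (data.getD ((data.length : Int) + curr).toNat "x") "$"
        || data.getD ((data.length : Int) + curr).toNat "x" == "") = true := by
      rw [isBoundary_negIdx data curr hlo hneg, isCmdAt] at hbd
      simp only [Bool.not_eq_true]
      exact hbd
    rw [collectLoopA, dif_pos hlt, hget]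
    dsimp only
    rw [if_neg hnb]
    by_cases hc1 : curr + 1 < 0
    · exact ih _ (curr + 1) (by omega) hc1 (by omega)
        (fun i hi hig => hall i hi (by omega)) ⟨j, hj, hjcmd⟩
    · -- curr + 1 = 0: the non-negative phase returns acc' ++ …, and acc' is non-empty
      have hc0 : curr + 1 = 0 := by omega
      rw [hc0, collectLoopA_eq data data.length _ 0 (by omega) (by simp) ⟨j, hj, by omega, hjcmd⟩]
      simp

theorem collect_ls_output_changed : Claim_changed_collect_ls_output := by
  unfold Claim_changed_collect_ls_output
  refine ⟨by decide, by decide, by decide, ?_, ?_, by decide⟩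
  · show collect_ls_output ["", "a"] (-1) = ["a"]
    simp [collect_ls_output, collectLoopA, PySem.List.pyGet?, PySem.List.pyIdx?]
    decide
  · show collect_ls_output_alt ["", "a"] (-1) = []
    simp [collect_ls_output_alt]
    decide

theorem collect_ls_output_tight : Claim_exact_collect_ls_output := by
  intro data start_line _ hpre hd
  obtain ⟨hneg, hlo, hall, j, hj, hjlt, hjcmd⟩ := hd
  unfold collect_ls_output collect_ls_output_alt
  -- B returns []: every index found by find? would have to be a boundary, which D_ rules out
  have halt : (match (PySem.List.pyRange start_line (data.length : Int) 1).find? (isBoundary data) with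
      | none => ([] : List String)
      | some e => PySem.List.slice data (some start_line) (some e)) = [] := by
    cases hfind : (PySem.List.pyRange start_line (data.length : Int) 1).find? (isBoundary data) with
    | none => rfl
    | some e =>
      dsimp only
      have hmem := List.mem_of_find?_eq_some hfind
      rw [PySem.List.mem_pyRange_one] at hmem
      have hbe := List.find?_some hfind
      by_cases he : e < 0
      · exfalso
        rw [isBoundary_negIdx data e (by omega) he] at hbe
        have : ((data.length : Int) + e).toNat < data.length := by omega
        rw [hall _ this (by omega)] at hbe
        exact Bool.false_ne_true hbe
      · push Not at he
        rw [isBoundary_nonnegIdx data e he hmem.2] at hbe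
        have helt : (e.toNat : Int) < (data.length : Int) + start_line := by
          by_contra hge
          push Not at hge
          rw [hall e.toNat (by omega) hge] at hbe
          exact Bool.false_ne_true hbe
        -- slice start_line e: start clamps to len+start_line > e, so the take is empty
        have ha : PySem.List.clampIdx data.length start_line
            = ((data.length : Int) + start_line).toNat := by
          simp only [PySem.List.clampIdx, if_pos hneg]
          rw [if_neg (by omega : ¬ ((data.length : Int) + start_line < 0))]
        have hb : PySem.List.clampIdx data.length e = e.toNat := by
          simp only [PySem.List.clampIdx, if_neg (by omega : ¬ (e < 0))]
          omega
        simp only [PySem.List.slice, ha, hb]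
        have : e.toNat - ((data.length : Int) + start_line).toNat = 0 := by omega
        rw [this]
        simp
  rw [halt]
  exact collectLoopA_ne_nil data ((-start_line).toNat) [] start_line hlo hneg rfl hall
    ⟨j, hj, hjcmd⟩
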